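-- pv_equiv track=rewrite | github.com/nasaharvest/cropharvest | cropharvest/utils.py | deterministic_shuffle
-- ===== SOURCE A (Python) =====
-- from typing import Dict, List, Tuple, Optional
--
-- def deterministic_shuffle(x: List, seed: int) -> List:
--     output_list: List = []
--     x = x.copy()
--
--     if seed % 2 == 0:
--         seed = -seed
--     while len(x) > 0:
--         if abs(seed) >= len(x):
--             is_negative = seed < 0
--             seed = min(seed % len(x), len(x) - 1)
--             if is_negative:
--                 # seed will now definitely be positive. This
--                 # ensures it will retain its original sign
--                 seed *= -1
--         output_list.append(x.pop(seed))
--         seed *= -1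
--     return output_list
-- ===== SOURCE B (Python) =====
-- from typing import List
--
--
-- def deterministic_shuffle(x: List, seed: int) -> List:
--     # Counted segment tree: k-th alive position is found and deleted in
--     # O(log n) instead of list.pop's O(n) shift.
--     n = len(x)
--     if seed % 2 == 0:
--         seed = -seed
--
--     def build(lo: int, hi: int):
--         # tree node = (alive_count, pos, left, right); leaf has left is None
--         if hi - lo == 1:
--             return (1, lo, None, None)
--         mid = (lo + hi) // 2
--         l = build(lo, mid)
--         r = build(mid, hi)
--         return (l[0] + r[0], -1, l, r)
--
--     def popk(t, k: int):
--         # remove the k-th (0-based) alive position from t, return (pos, t')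
--         cnt, pos, l, r = t
--         if l is None:
--             return pos, (0, pos, None, None)
--         if k < l[0]:
--             p, l2 = popk(l, k)
--             return p, (cnt - 1, -1, l2, r)
--         p, r2 = popk(r, k - l[0])
--         return p, (cnt - 1, -1, l, r2)
--
--     order: List[int] = []
--     if n > 0:
--         t = build(0, n)
--         m = n
--         while m > 0:
--             if abs(seed) >= m:
--                 is_negative = seed < 0
--                 seed = min(seed % m, m - 1)
--                 if is_negative:
--                     seed *= -1
--             k = seed if seed >= 0 else m + seed
--             pos, t = popk(t, k)
--             order.append(pos)
--             m -= 1
--             seed *= -1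
--     return [x[p] for p in order]
-- ===== Notes on version B (the rewrite author's own statement) =====
-- stated objective: faster
-- what changed: Replaces A's repeated list.pop (an O(n) element shift per draw) with a counted segment tree that finds and deletes the k-th remaining position in O(log n), keeping A's seed index arithmetic unchanged.
import Mathlib
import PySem

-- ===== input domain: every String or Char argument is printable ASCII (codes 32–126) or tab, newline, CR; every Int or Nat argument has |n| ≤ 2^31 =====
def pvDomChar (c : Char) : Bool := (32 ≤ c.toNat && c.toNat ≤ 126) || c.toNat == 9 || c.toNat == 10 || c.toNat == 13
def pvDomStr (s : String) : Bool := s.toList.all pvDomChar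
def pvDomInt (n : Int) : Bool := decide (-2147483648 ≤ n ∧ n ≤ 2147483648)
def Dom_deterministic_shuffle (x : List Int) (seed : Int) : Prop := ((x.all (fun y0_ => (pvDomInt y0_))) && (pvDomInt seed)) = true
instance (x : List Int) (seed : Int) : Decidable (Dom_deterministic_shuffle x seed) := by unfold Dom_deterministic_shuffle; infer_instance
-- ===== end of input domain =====

-- B replaces A's O(n^2) repeated list.pop with a counted segment tree (O(log n)
-- k-th-alive selection/deletion), reusing the same seed index arithmetic.

-- ===== PORT A =====
-- while loop of A: recursion on the remaining list; pop via PySem.List.pop?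
-- (the `none` branch is an unreachable totalization guard: the normalized seed
-- is always a valid pop index).
def pvGoA (x : List Int) (seed : Int) : List Int :=
  if hx : x = [] then []
  else
    let seed1 : Int :=
      if |seed| ≥ (x.length : Int) then
        let s := min (PySem.Int.mod seed (x.length : Int)) ((x.length : Int) - 1)
        if seed < 0 then -s else s
      else seed
    match h : PySem.List.pop? x seed1 with
    | some (v, x') => v :: pvGoA x' (-seed1)
    | none => []
termination_by x.length
decreasing_by
  have h2 := PySem.List.length_of_pop?_eq_some x h
  simp at h2
  omega

def deterministic_shuffle (x : List Int) (seed : Int) : List Int :=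
  pvGoA x (if PySem.Int.mod seed 2 = 0 then -seed else seed)

-- ===== PORT B =====
-- tree node: leaf (alive count, position) / inner node (alive count, children)
inductive PvTree : Type where
  | leaf : Int → Nat → PvTree
  | node : Int → PvTree → PvTree → PvTree
deriving DecidableEq, Repr

def PvTree.cnt : PvTree → Int
  | .leaf c _ => c
  | .node c _ _ => c

-- build(lo, hi); only called with lo < hi (the `hi ≤ lo` leaf is an
-- unreachable totalization guard). (lo+hi)//2 on nonnegative ints = Nat `/`.
def pvBuild (lo hi : Nat) : PvTree :=
  if hi - lo = 1 then .leaf 1 lo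
  else if h : hi ≤ lo then .leaf 0 lo
  else
    let mid := (lo + hi) / 2
    let l := pvBuild lo mid
    let r := pvBuild mid hi
    .node (l.cnt + r.cnt) l r
termination_by hi - lo
decreasing_by all_goals omega

-- popk: remove the k-th alive position, return it with the updated tree
def pvPopk : PvTree → Int → Nat × PvTree
  | .leaf _ pos, _ => (pos, .leaf 0 pos)
  | .node c l r, k =>
      if k < l.cnt then
        let res := pvPopk l k
        (res.1, .node (c - 1) res.2 r)
      else
        let res := pvPopk r (k - l.cnt)
        (res.1, .node (c - 1) l res.2)

-- while loop of B: m = current alive count, decreases by 1 each iteration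
def pvGoB : Nat → PvTree → Int → List Nat
  | 0, _, _ => []
  | m + 1, t, seed =>
      let len : Int := (m : Int) + 1
      let seed1 : Int :=
        if |seed| ≥ len then
          let s := min (PySem.Int.mod seed len) (len - 1)
          if seed < 0 then -s else s
        else seed
      let k : Int := if seed1 ≥ 0 then seed1 else len + seed1
      let res := pvPopk t k
      res.1 :: pvGoB m res.2 (-seed1)

def deterministic_shuffle_alt (x : List Int) (seed : Int) : List Int :=
  let n := x.length
  let seed0 : Int := if PySem.Int.mod seed 2 = 0 then -seed else seed
  let order := if n > 0 then pvGoB n (pvBuild 0 n) seed0 else []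
  order.map (fun p => x.getD p 0)

-- ===== PRECONDITION & SPEC =====
def Spec_deterministic_shuffle (x : List Int) (seed : Int) (out : List Int) : Prop := out = deterministic_shuffle_alt x seed
instance (x : List Int) (seed : Int) (out : List Int) : Decidable (Spec_deterministic_shuffle x seed out) := by unfold Spec_deterministic_shuffle; infer_instance

-- ===== CLAIM (what is proved, stated in full; the proofs are below) =====
def Claim_equal_deterministic_shuffle : Prop := ∀ (x : List Int) (seed : Int), Dom_deterministic_shuffle x seed → Spec_deterministic_shuffle x seed (deterministic_shuffle x seed)

-- ===== LEMMAS AND PROOFS =====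

-- the list of alive positions represented by a tree
def pvToList : PvTree → List Nat
  | .leaf c pos => if c = 1 then [pos] else []
  | .node _ l r => pvToList l ++ pvToList r

-- well-formedness: counts cache the number of alive leaves
def pvWF : PvTree → Prop
  | .leaf c _ => c = 0 ∨ c = 1
  | .node c l r => c = l.cnt + r.cnt ∧ pvWF l ∧ pvWF r

theorem pvCnt_leaf (c : Int) (p : Nat) : (PvTree.leaf c p).cnt = c := rfl
theorem pvCnt_node (c : Int) (l r : PvTree) : (PvTree.node c l r).cnt = c := rfl

theorem pvCnt_eq_len (t : PvTree) (hw : pvWF t) : t.cnt = ((pvToList t).length : Int) := by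
  induction t with
  | leaf c pos =>
      rcases hw with h | h <;> simp [pvToList, pvCnt_leaf, h]
  | node c l r ihl ihr =>
      obtain ⟨hc, hl, hr⟩ := hw
      rw [pvCnt_node, hc, ihl hl, ihr hr]
      simp [pvToList]

theorem pvPopk_correct (t : PvTree) (k : Int) (hw : pvWF t)
    (hk0 : 0 ≤ k) (hk : k < t.cnt) :
    (pvToList t)[k.toNat]? = some (pvPopk t k).1 ∧
    pvToList (pvPopk t k).2 = (pvToList t).eraseIdx k.toNat ∧
    pvWF (pvPopk t k).2 ∧ (pvPopk t k).2.cnt = t.cnt - 1 := by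
  induction t generalizing k with
  | leaf c pos =>
      have hc : c = 1 := by
        rcases hw with h | h
        · rw [pvCnt_leaf, h] at hk; omega
        · exact h
      have hk1 : k = 0 := by rw [pvCnt_leaf, hc] at hk; omega
      subst hc hk1
      simp [pvPopk, pvToList, pvWF, pvCnt_leaf]
  | node c l r ihl ihr =>
      obtain ⟨hc, hl, hr⟩ := hw
      have hlen : l.cnt = ((pvToList l).length : Int) := pvCnt_eq_len l hl
      have hrlen : r.cnt = ((pvToList r).length : Int) := pvCnt_eq_len r hr
      rw [pvCnt_node] at hk
      by_cases hkl : k < l.cnt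
      · obtain ⟨h1, h2, h3, h4⟩ := ihl k hl hk0 hkl
        have hklen : k.toNat < (pvToList l).length := by omega
        refine ⟨?_, ?_, ?_, ?_⟩
        · simp [pvPopk, hkl, pvToList, List.getElem?_append_left hklen, h1]
        · simp [pvPopk, hkl, pvToList, List.eraseIdx_append_of_lt_length hklen, h2]
        · simp only [pvPopk, if_pos hkl, pvWF]
          exact ⟨by omega, h3, hr⟩
        · simp [pvPopk, hkl, pvCnt_node]
      · have hk2 : 0 ≤ k - l.cnt := by omega
        have hk3 : k - l.cnt < r.cnt := by omega
        obtain ⟨h1, h2, h3, h4⟩ := ihr (k - l.cnt) hr hk2 hk3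
        have htn : k.toNat = (pvToList l).length + (k - l.cnt).toNat := by omega
        refine ⟨?_, ?_, ?_, ?_⟩
        · simp [pvPopk, hkl, pvToList, htn, List.getElem?_append_right (Nat.le_add_right _ _), h1]
        · simp only [pvPopk, if_neg hkl, pvToList]
          rw [htn, List.eraseIdx_append_of_length_le (l := pvToList l) (Nat.le_add_right _ _) (pvToList r)]
          simp [h2]
        · simp only [pvPopk, if_neg hkl, pvWF]
          exact ⟨by omega, hl, h3⟩
        · simp [pvPopk, hkl, pvCnt_node]

theorem pvBuild_correct (lo hi : Nat) (h : lo < hi) :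
    pvToList (pvBuild lo hi) = List.range' lo (hi - lo) ∧ pvWF (pvBuild lo hi) := by
  generalize hd : hi - lo = d
  induction d using Nat.strong_induction_on generalizing lo hi with
  | _ d ih =>
    rw [pvBuild]
    by_cases h1 : hi - lo = 1
    · simp only [h1, if_pos rfl]
      have : d = 1 := by omega
      subst this
      constructor
      · have : hi = lo + 1 := by omega
        simp [this, pvToList, List.range']
      · simp [pvWF]
    · rw [if_neg h1, dif_neg (by omega)]
      have hlm : lo < (lo + hi) / 2 := by omega
      have hmh : (lo + hi) / 2 < hi := by omega
      obtain ⟨hL, hwL⟩ := ih ((lo + hi) / 2 - lo) (by omega) lo ((lo + hi) / 2) hlm rfl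
      obtain ⟨hR, hwR⟩ := ih (hi - (lo + hi) / 2) (by omega) ((lo + hi) / 2) hi hmh rfl
      constructor
      · simp only [pvToList, hL, hR]
        have h2 := @List.range'_append lo ((lo + hi) / 2 - lo) (hi - (lo + hi) / 2) 1
        rw [show lo + 1 * ((lo + hi) / 2 - lo) = (lo + hi) / 2 by omega] at h2
        rw [h2]
        congr 1
        omega
      · exact ⟨rfl, hwL, hwR⟩

-- the key simulation: A's pop loop over values = B's tree loop over positions
theorem pvGo_sim (m : Nat) (t : PvTree) (seed : Int) (ys : List Int) (f : Nat → Int)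
    (hw : pvWF t) (hlen : (pvToList t).length = m) (hys : ys = (pvToList t).map f) :
    pvGoA ys seed = (pvGoB m t seed).map f := by
  induction m generalizing t seed ys with
  | zero =>
      have : ys = [] := by simp [hys, List.eq_nil_of_length_eq_zero hlen]
      subst this
      rw [pvGoA.eq_def, pvGoB]
      simp
  | succ m ih =>
      have hyslen : ys.length = m + 1 := by simp [hys, hlen]
      have hyne : ys ≠ [] := by intro h; simp [h] at hyslen
      rw [pvGoA, dif_neg hyne, pvGoB]
      simp only [hyslen]
      set len : Int := (m : Int) + 1 with hlendef
      have hcast : (ys.length : Int) = len := by simp [hyslen, hlendef]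
      rw [hcast]
      set seed1 : Int :=
        if |seed| ≥ len then
          let s := min (PySem.Int.mod seed len) (len - 1)
          if seed < 0 then -s else s
        else seed with hseed1
      have hlpos : (0 : Int) < len := by omega
      have hb : -len ≤ seed1 ∧ seed1 < len := by
        by_cases hbig : |seed| ≥ len
        · have hmodeq : PySem.Int.mod seed len = seed % len :=
            PySem.Int.mod_eq_emod_of_pos hlpos
          have h0 : 0 ≤ seed % len := Int.emod_nonneg seed (by omega)
          have h1 : seed % len < len := Int.emod_lt_of_pos seed hlpos
          simp only [hseed1, if_pos hbig, hmodeq]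
          by_cases hneg : seed < 0 <;> simp [hneg] <;> omega
        · have h2 := abs_lt.mp (not_le.mp hbig)
          simp only [hseed1, if_neg hbig]
          omega
      set k : Int := if seed1 ≥ 0 then seed1 else len + seed1 with hkdef
      have hk0 : 0 ≤ k := by by_cases h : seed1 ≥ 0 <;> simp [hkdef, h] <;> omega
      have hkl : k < len := by by_cases h : seed1 ≥ 0 <;> simp [hkdef, h] <;> omega
      have hcnt : t.cnt = len := by rw [pvCnt_eq_len t hw, hlen]; push_cast; omega
      obtain ⟨hg, he, hw', hc'⟩ := pvPopk_correct t k hw hk0 (by omega)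
      -- pop? ys seed1 = some (ys[k.toNat], ys.eraseIdx k.toNat)
      have hkn : k.toNat < ys.length := by omega
      have hpop : PySem.List.pop? ys seed1 = some (ys[k.toNat], ys.eraseIdx k.toNat) := by
        by_cases h : seed1 ≥ 0
        · have hks : k = seed1 := by simp [hkdef, h]
          have : seed1 = ((seed1.toNat : Nat) : Int) := by omega
          rw [this, PySem.List.pop?_natCast ys seed1.toNat (by omega)]
          simp [hks]
        · simp only [PySem.List.pop?, PySem.List.pyIdx?]
          have h2 : ¬ (0 : Int) ≤ seed1 := by omega
          have h4 : -(ys.length : Int) ≤ seed1 := by omega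
          have hks : k = len + seed1 := by simp [hkdef, h]
          have hix : ys.length - (-seed1).toNat = k.toNat := by omega
          simp [h2, h4, hix, List.getElem?_eq_getElem (by omega : k.toNat < ys.length)]
      rw [hpop]
      simp only
      have hgv : ys[k.toNat] = f (pvPopk t k).1 := by
        have : (pvToList t)[k.toNat]? = some (pvPopk t k).1 := hg
        have hgetl : (pvToList t)[k.toNat] = (pvPopk t k).1 := by
          have hkn' : k.toNat < (pvToList t).length := by omega
          simpa [List.getElem?_eq_getElem hkn'] using this
        simp [hys, ← hgetl, List.getElem_map]
      rw [hgv]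
      congr 1
      exact ih (pvPopk t k).2 (-seed1) (ys.eraseIdx k.toNat)
        hw'
        (by rw [he]
            have hkt : k.toNat < (pvToList t).length := by omega
            simp [List.length_eraseIdx, hkt]
            omega)
        (by rw [hys, he, List.eraseIdx_map])

theorem pvList_eq_map_range' (x : List Int) :
    x = (List.range' 0 x.length).map (fun p => x.getD p 0) := by
  apply List.ext_getElem
  · simp
  · intro i h1 h2
    simp [List.getElem_range', List.getD_eq_getElem?_getD, List.getElem?_eq_getElem h1]

-- ===== VERDICT (by name: the statement is the Claim_ definition above) =====
theorem deterministic_shuffle_spec : Claim_equal_deterministic_shuffle := by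
  intro x seed _
  unfold Spec_deterministic_shuffle deterministic_shuffle deterministic_shuffle_alt
  set seed0 : Int := if PySem.Int.mod seed 2 = 0 then -seed else seed
  by_cases hx : x.length > 0
  · simp only [if_pos hx]
    obtain ⟨hL, hW⟩ := pvBuild_correct 0 x.length hx
    exact pvGo_sim x.length (pvBuild 0 x.length) seed0 x (fun p => x.getD p 0)
      hW (by simp [hL]) (by rw [hL]; simpa using pvList_eq_map_range' x)
  · have : x = [] := by simpa using List.eq_nil_of_length_eq_zero (by omega)
    subst this
    rw [pvGoA.eq_def]
    simp
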